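-- pv_equiv track=rewrite | github.com/Sychedelic-but-cooler/vidnag | backend/utils/validation.py | _is_domain_in_list
-- ===== SOURCE A (Python) =====
-- from typing import Tuple, Optional, List
--
-- def _is_domain_in_list(domain: str, domain_list: List[str]) -> bool:
--     """
--     Check if domain matches any entry in the domain list
--     Supports exact matches and subdomain wildcard matching
--
--     Args:
--         domain: The domain to check (e.g., "www.youtube.com")
--         domain_list: List of allowed/blocked domains (e.g., ["youtube.com"])
--
--     Returns:
--         True if domain matches, False otherwise
--     """
--     # Remove port if present
--     domain = domain.split(':')[0].lower()
--
--     for allowed in domain_list: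
--         allowed = allowed.lower()
--
--         # Exact match
--         if domain == allowed:
--             return True
--
--         # Subdomain match (e.g., www.youtube.com matches youtube.com)
--         if domain.endswith('.' + allowed):
--             return True
--
--     return False
-- ===== SOURCE B (Python) =====
-- def _is_domain_in_list(domain, domain_list):
--     host = domain.split(':')[0].lower()
--     entries = {e.lower() for e in domain_list}
--     if host in entries:
--         return True
--     for i, ch in enumerate(host):
--         if ch == '.' and host[i + 1:] in entries:
--             return True
--     return False
-- ===== Notes on version B (the rewrite author's own statement) =====
-- stated objective: alternative
-- what changed: B lowercases the list once into a hash set and walks the host string once, membership-testing the suffix after each dot, instead of A's per-entry scan with a string concatenation and endswith per entry.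
import Mathlib
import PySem

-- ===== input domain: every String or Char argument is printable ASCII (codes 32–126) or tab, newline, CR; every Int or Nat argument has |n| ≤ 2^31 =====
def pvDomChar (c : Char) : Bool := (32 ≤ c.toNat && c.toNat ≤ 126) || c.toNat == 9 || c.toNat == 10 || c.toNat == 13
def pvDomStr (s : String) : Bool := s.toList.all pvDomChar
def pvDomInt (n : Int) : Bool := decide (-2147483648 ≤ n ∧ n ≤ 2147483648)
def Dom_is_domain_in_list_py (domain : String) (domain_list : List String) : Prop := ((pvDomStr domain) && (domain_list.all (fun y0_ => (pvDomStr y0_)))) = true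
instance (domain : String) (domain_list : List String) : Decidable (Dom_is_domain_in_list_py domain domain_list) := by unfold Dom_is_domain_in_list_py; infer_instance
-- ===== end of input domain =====

-- B builds a set of the lowercased entries once and membership-tests the host and the
-- suffix after each dot of the host, instead of A's per-entry endswith scan (objective: alternative).

-- ===== PORT A =====
-- domain.split(':')[0].lower()   (shared first line of both Pythons)
def pvHost (domain : String) : List Char :=
  PySem.Chars.lower ((PySem.Chars.splitOn domain.toList [':']).headD [])

-- the 'for allowed in domain_list' loop of A, with its early returns
def pvLoopA (host : List Char) : List String → Bool
  | [] => false
  | a :: rest =>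
    let al := PySem.Chars.lower a.toList
    if host = al then true
    else if PySem.Chars.endswith host ('.' :: al) then true
    else pvLoopA host rest

def is_domain_in_list_py (domain : String) (domain_list : List String) : Bool :=
  pvLoopA (pvHost domain) domain_list

-- ===== PORT B =====
-- the 'for i, ch in enumerate(host)' loop of B: at each position, ch = head, host[i+1:] = tail
def pvLoopB (entries : PySem.Set (List Char)) : List Char → Bool
  | [] => false
  | c :: rest =>
    if c = '.' ∧ PySem.Set.contains entries rest then true else pvLoopB entries rest

def is_domain_in_list_py_alt (domain : String) (domain_list : List String) : Bool :=
  let host := pvHost domain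
  let entries := PySem.Set.ofList (domain_list.map (fun e => PySem.Chars.lower e.toList))
  if PySem.Set.contains entries host then true else pvLoopB entries host

-- ===== PRECONDITION & SPEC =====
def Spec_is_domain_in_list_py (domain : String) (domain_list : List String) (out : Bool) : Prop := out = is_domain_in_list_py_alt domain domain_list
instance (domain : String) (domain_list : List String) (out : Bool) : Decidable (Spec_is_domain_in_list_py domain domain_list out) := by unfold Spec_is_domain_in_list_py; infer_instance

-- ===== CLAIM (what is proved, stated in full; the proofs are below) =====
def Claim_equal_is_domain_in_list_py : Prop := ∀ (domain : String) (domain_list : List String), Dom_is_domain_in_list_py domain domain_list → Spec_is_domain_in_list_py domain domain_list (is_domain_in_list_py domain domain_list)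

-- ===== LEMMAS AND PROOFS =====

theorem pvLoopA_iff (host : List Char) (l : List String) :
    pvLoopA host l = true ↔
      ∃ a ∈ l, host = PySem.Chars.lower a.toList ∨ ('.' :: PySem.Chars.lower a.toList) <:+ host := by
  induction l with
  | nil => simp [pvLoopA]
  | cons a rest ih =>
    simp only [pvLoopA, List.mem_cons]
    split_ifs with h1 h2
    · simp [h1]
    · simp [PySem.Chars.endswith_iff] at h2
      simp [h2]
    · rw [PySem.Chars.endswith_iff] at h2
      constructor
      · intro h
        obtain ⟨x, hx, hor⟩ := ih.mp h
        exact ⟨x, Or.inr hx, hor⟩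
      · rintro ⟨x, hx | hx, hor⟩
        · subst hx
          rcases hor with h | h
          · exact absurd h h1
          · exact absurd h (by simpa using h2)
        · exact ih.mpr ⟨x, hx, hor⟩

theorem pvLoopB_iff (entries : PySem.Set (List Char)) (cs : List Char) :
    pvLoopB entries cs = true ↔
      ∃ x, ('.' :: x) <:+ cs ∧ PySem.Set.contains entries x = true := by
  induction cs with
  | nil =>
    simp only [pvLoopB, Bool.false_eq_true, false_iff, not_exists]
    rintro x ⟨hx, -⟩
    have := hx.length_le
    simp at this
  | cons c rest ih =>
    simp only [pvLoopB]
    split_ifs with h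
    · obtain ⟨hc, hm⟩ := h
      subst hc
      simp only [true_iff]
      exact ⟨rest, List.suffix_refl _, hm⟩
    · rw [ih]
      constructor
      · rintro ⟨x, hx, hm⟩
        exact ⟨x, hx.trans (List.suffix_cons _ _), hm⟩
      · rintro ⟨x, hx, hm⟩
        rcases List.suffix_cons_iff.mp hx with heq | hsuf
        · cases heq
          exact absurd ⟨rfl, hm⟩ h
        · exact ⟨x, hsuf, hm⟩

theorem pvContains_iff (l : List String) (x : List Char) :
    PySem.Set.contains (PySem.Set.ofList (l.map (fun e => PySem.Chars.lower e.toList))) x = true ↔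
      ∃ a ∈ l, x = PySem.Chars.lower a.toList := by
  rw [PySem.Set.contains_iff]
  rw [PySem.Set.mem_ofList]
  simp [eq_comm]

-- ===== VERDICT (by name: the statement is the Claim_ definition above) =====
theorem pvAlt_eq (domain : String) (domain_list : List String) :
    is_domain_in_list_py_alt domain domain_list =
      (if PySem.Set.contains
            (PySem.Set.ofList (domain_list.map (fun e => PySem.Chars.lower e.toList)))
            (pvHost domain) = true then true
       else pvLoopB
            (PySem.Set.ofList (domain_list.map (fun e => PySem.Chars.lower e.toList)))
            (pvHost domain)) := rfl

theorem is_domain_in_list_py_spec : Claim_equal_is_domain_in_list_py := by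
  intro domain domain_list _
  unfold Spec_is_domain_in_list_py is_domain_in_list_py
  rw [pvAlt_eq]
  set host := pvHost domain with hh
  set entries := PySem.Set.ofList (domain_list.map (fun e => PySem.Chars.lower e.toList)) with he
  by_cases hA : pvLoopA host domain_list = true
  · rw [hA]
    obtain ⟨a, ha, hor⟩ := (pvLoopA_iff host domain_list).mp hA
    rcases hor with h | h
    · rw [if_pos ((pvContains_iff domain_list host).mpr ⟨a, ha, h⟩)]
    · split_ifs with hc
      · rfl
      · exact ((pvLoopB_iff entries host).mpr
          ⟨PySem.Chars.lower a.toList, h, (pvContains_iff domain_list _).mpr ⟨a, ha, rfl⟩⟩).symm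
  · rw [Bool.not_eq_true] at hA
    rw [hA]
    split_ifs with hc
    · obtain ⟨a, ha, hx⟩ := (pvContains_iff domain_list host).mp hc
      exact absurd ((pvLoopA_iff host domain_list).mpr ⟨a, ha, Or.inl hx⟩)
        (by simp [hA])
    · by_cases hB : pvLoopB entries host = true
      · obtain ⟨x, hx, hm⟩ := (pvLoopB_iff entries host).mp hB
        obtain ⟨a, ha, rfl⟩ := (pvContains_iff domain_list x).mp hm
        exact absurd ((pvLoopA_iff host domain_list).mpr ⟨a, ha, Or.inr hx⟩)
          (by simp [hA])
      · rw [Bool.not_eq_true] at hB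
        exact hB.symm
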